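-- pv_equiv track=rewrite | github.com/QuBenhao/LeetCode | problems/problems_3605/solution.py | minStable
-- ===== SOURCE A (Python) =====
-- from typing import List
--
-- from math import gcd
--
-- def minStable(nums: List[int], maxC: int) -> int:
--     n = len(nums)
--
--     gs = []
--     for i, num in enumerate(nums):
--         gs.append([[v, j] for v, j in gs[i-1]] if i > 0 else [])
--         g = gs[i]
--         g.append([num, i])
--         j = 0
--         for p in g:
--             p[0] = gcd(p[0], num)
--             if g[j][0] != p[0]:
--                 j += 1
--                 g[j] = p
--         del g[j+1:]
--
--     def check(k) -> bool:
--         if k == 0: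
--             return sum(num != 1 for num in nums) <= maxC
--         change = 0
--         i = n - 1
--         while i >= 0:
--             for v, j in gs[i][::-1]:
--                 if v != 1 and i - j + 1 > k:
--                     change += 1
--                     if change > maxC:
--                         return False
--                     i = max(i - k - 1, j - 1)
--                     break
--             else:
--                 i -= 1
--         return True
--
--     left, right = 0, n
--     while left < right:
--         mid = (left + right) // 2
--         if check(mid):
--             right = mid
--         else:
--             left = mid + 1
--     return left
-- ===== SOURCE B (Python) =====
-- from math import gcd
--
-- def minStable(nums, maxC):
--     # Simpler: no precomputed distinct-gcd suffix lists; the greedy check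
--     # computes the gcd of the single window of length k+1 ending at i directly
--     # (a longer bad subarray ending at i exists iff that window's gcd != 1).
--     n = len(nums)
--
--     def window_gcd(lo, hi):
--         g = 0
--         for j in range(lo, hi + 1):
--             g = gcd(g, nums[j])
--             if g == 1:
--                 break
--         return g
--
--     def check(k):
--         if k == 0:
--             return sum(num != 1 for num in nums) <= maxC
--         change = 0
--         i = n - 1
--         while i >= 0:
--             if i >= k and window_gcd(i - k, i) != 1:
--                 change += 1
--                 if change > maxC:
--                     return False
--                 i -= k + 1
--             else:
--                 i -= 1
--         return True
--
--     left, right = 0, n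
--     while left < right:
--         mid = (left + right) // 2
--         if check(mid):
--             right = mid
--         else:
--             left = mid + 1
--     return left
-- ===== Notes on version B (the rewrite author's own statement) =====
-- stated objective: simpler
-- what changed: B drops A's incrementally maintained lists of distinct suffix gcds (gs) entirely: its greedy check computes the gcd of the single window of length k+1 ending at i directly (with an early break once the running gcd reaches 1), since a longer bad subarray ending at i exists iff that window's gcd is not 1.
import Mathlib
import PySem

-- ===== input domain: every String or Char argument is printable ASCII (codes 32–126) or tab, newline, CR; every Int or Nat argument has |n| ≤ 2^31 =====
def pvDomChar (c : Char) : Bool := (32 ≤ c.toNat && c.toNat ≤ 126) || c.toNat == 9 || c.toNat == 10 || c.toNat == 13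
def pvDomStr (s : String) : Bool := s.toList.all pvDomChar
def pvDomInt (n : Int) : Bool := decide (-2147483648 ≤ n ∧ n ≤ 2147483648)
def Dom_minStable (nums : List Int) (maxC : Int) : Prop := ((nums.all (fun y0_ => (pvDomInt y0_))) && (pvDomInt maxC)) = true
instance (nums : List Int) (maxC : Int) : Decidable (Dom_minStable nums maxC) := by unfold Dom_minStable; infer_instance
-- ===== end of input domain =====

-- B replaces A's incremental distinct-gcd suffix lists by a direct gcd of the single
-- window of length k+1 ending at i inside the greedy check (objective: simpler).

-- math.gcd of two ints (nonnegative result); used by both Pythons via `from math import gcd`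
def mathGcd (a b : Int) : Int := (Int.gcd a b : Int)

-- ===== PORT A =====
-- the in-place dedup pass: `p[0] = gcd(p[0], num)` already applied; keep first of each
-- run of equal gcd values (`if g[j][0] != p[0]: j += 1; g[j] = p` … `del g[j+1:]`)
def gsDedupGo (last : Int) : List (Int × Int) → List (Int × Int)
  | [] => []
  | p :: rest => if p.1 ≠ last then p :: gsDedupGo p.1 rest else gsDedupGo last rest

def dedupFirst : List (Int × Int) → List (Int × Int)
  | [] => []
  | h :: t => h :: gsDedupGo h.1 t

-- one iteration of A's gs-building loop: g = prev + [[num, i]], map gcd, dedup runs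
def gsStep (prev : List (Int × Int)) (num : Int) (i : Int) : List (Int × Int) :=
  dedupFirst ((prev ++ [(num, i)]).map (fun p => (mathGcd p.1 num, p.2)))

-- `gs.append(...)` loop; the second state component is gs[i-1] (the last appended list)
def buildGs (nums : List Int) : List (List (Int × Int)) :=
  ((PySem.List.enumerate nums).foldl
    (fun (st : List (List (Int × Int)) × List (Int × Int)) pr =>
      let g := gsStep st.2 pr.2 pr.1
      (st.1 ++ [g], g))
    ([], [])).1

-- `for v, j in gs[i][::-1]: if v != 1 and i - j + 1 > k: … break` (else-clause = none)
def findHit (k i : Int) : List (Int × Int) → Option Int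
  | [] => none
  | p :: rest => if p.1 ≠ 1 ∧ i - p.2 + 1 > k then some p.2 else findHit k i rest

-- the `while i >= 0` loop of A's check (fuel = one unit per iteration, enough is supplied)
def checkLoopA (gs : List (List (Int × Int))) (k maxC : Int) : Nat → Int → Int → Bool
  | 0, _, _ => true
  | fuel + 1, i, change =>
    if i ≥ 0 then
      -- gs[i][::-1] : [::-1] is reverse (PySem.List.slice?_none_none_neg_one)
      match findHit k i (((PySem.List.pyGet? gs i).getD []).reverse) with
      | some j =>
        if change + 1 > maxC then false
        else checkLoopA gs k maxC fuel (max (i - k - 1) (j - 1)) (change + 1)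
      | none => checkLoopA gs k maxC fuel (i - 1) change
    else true

def checkA (nums : List Int) (gs : List (List (Int × Int))) (maxC k : Int) : Bool :=
  if k = 0 then
    decide ((nums.foldl (fun acc num => acc + (if num ≠ 1 then (1 : Int) else 0)) 0) ≤ maxC)
  else
    checkLoopA gs k maxC (nums.length + 1) (PySem.List.len nums - 1) 0

-- `while left < right` binary search
def bsearchA (check : Int → Bool) : Nat → Int → Int → Int
  | 0, left, _ => left
  | fuel + 1, left, right =>
    if left < right then
      let mid := PySem.Int.floordiv (left + right) 2
      if check mid then bsearchA check fuel left mid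
      else bsearchA check fuel (mid + 1) right
    else left

def minStable (nums : List Int) (maxC : Int) : Int :=
  let gs := buildGs nums
  bsearchA (checkA nums gs maxC) (nums.length + 1) 0 (PySem.List.len nums)

-- ===== PORT B =====
-- window_gcd: running gcd over nums[j] for j in range(lo, hi+1), breaking once it reaches 1
-- (pyGetD is a guarded total form of nums[j]; the loop only visits indices 0 ≤ j < len(nums))
def winGcd (nums : List Int) (g : Int) : List Int → Int
  | [] => g
  | j :: rest =>
    let g' := mathGcd g (PySem.List.pyGetD nums j 0)
    if g' = 1 then 1 else winGcd nums g' rest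

-- B's `while i >= 0` loop: test the single window nums[i-k : i+1] directly
def checkLoopB (nums : List Int) (k maxC : Int) : Nat → Int → Int → Bool
  | 0, _, _ => true
  | fuel + 1, i, change =>
    if i ≥ 0 then
      if i ≥ k ∧ winGcd nums 0 (PySem.List.pyRange (i - k) (i + 1) 1) ≠ 1 then
        if change + 1 > maxC then false
        else checkLoopB nums k maxC fuel (i - (k + 1)) (change + 1)
      else checkLoopB nums k maxC fuel (i - 1) change
    else true

def checkB (nums : List Int) (maxC k : Int) : Bool :=
  if k = 0 then
    decide ((nums.foldl (fun acc num => acc + (if num ≠ 1 then (1 : Int) else 0)) 0) ≤ maxC)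
  else
    checkLoopB nums k maxC (nums.length + 1) (PySem.List.len nums - 1) 0

def bsearchB (check : Int → Bool) : Nat → Int → Int → Int
  | 0, left, _ => left
  | fuel + 1, left, right =>
    if left < right then
      let mid := PySem.Int.floordiv (left + right) 2
      if check mid then bsearchB check fuel left mid
      else bsearchB check fuel (mid + 1) right
    else left

def minStable_alt (nums : List Int) (maxC : Int) : Int :=
  bsearchB (checkB nums maxC) (nums.length + 1) 0 (PySem.List.len nums)

-- ===== PRECONDITION & SPEC =====
def Spec_minStable (nums : List Int) (maxC : Int) (out : Int) : Prop := out = minStable_alt nums maxC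
instance (nums : List Int) (maxC : Int) (out : Int) : Decidable (Spec_minStable nums maxC out) := by unfold Spec_minStable; infer_instance

-- ===== CLAIM (what is proved, stated in full; the proofs are below) =====
def Claim_equal_minStable : Prop := ∀ (nums : List Int) (maxC : Int), Dom_minStable nums maxC → Spec_minStable nums maxC (minStable nums maxC)

-- ===== LEMMAS AND PROOFS =====

-- gcd of the segment nums[a..hi] (Nat bounds), as the fold B computes
def segGN (nums : List Int) (a hi : Nat) : Int :=
  ((nums.drop a).take (hi + 1 - a)).foldl mathGcd 0

-- the canonical description of A's gs[i]: run-dedup of j ↦ gcd(nums[j..i])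
def canon (nums : List Int) (i : Nat) : List (Int × Int) :=
  dedupFirst ((List.range (i + 1)).map (fun j => (segGN nums j i, (j : Int))))

theorem foldl_idxGcd_one (nums : List Int) (js : List Int) :
    js.foldl (fun g j => mathGcd g (PySem.List.pyGetD nums j 0)) 1 = 1 := by
  induction js with
  | nil => rfl
  | cons j t ih => simpa [mathGcd, Int.one_gcd] using ih

theorem winGcd_eq_foldl (nums : List Int) (l : List Int) :
    ∀ g : Int, winGcd nums g l = l.foldl (fun g j => mathGcd g (PySem.List.pyGetD nums j 0)) g := by
  induction l with
  | nil => intro g; rfl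
  | cons j t ih =>
    intro g
    show (if mathGcd g (PySem.List.pyGetD nums j 0) = 1 then 1
        else winGcd nums (mathGcd g (PySem.List.pyGetD nums j 0)) t) = _
    rw [List.foldl_cons]
    by_cases h : mathGcd g (PySem.List.pyGetD nums j 0) = 1
    · rw [if_pos h, h, foldl_idxGcd_one]
    · rw [if_neg h, ih]

theorem foldl_idx (nums : List Int) (a : Nat) :
    ∀ cnt : Nat, a + cnt ≤ nums.length → ∀ g : Int,
      (List.range cnt).foldl (fun g t => mathGcd g (nums.getD (a + t) 0)) g
        = ((nums.drop a).take cnt).foldl mathGcd g := by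
  intro cnt
  induction cnt with
  | zero => intro _ g; rfl
  | succ c ihc =>
    intro h g
    have hac : a + c < nums.length := by omega
    have e2 : (nums.drop a).take (c + 1) = (nums.drop a).take c ++ [nums[a + c]] := by
      rw [List.take_add_one, List.getElem?_drop, List.getElem?_eq_getElem hac]
      rfl
    rw [List.range_succ, List.foldl_append, e2, List.foldl_append, ihc (by omega) g]
    show mathGcd _ (nums.getD (a + c) 0) = mathGcd _ nums[a + c]
    rw [List.getD_eq_getElem nums 0 hac]

theorem foldl_mathGcd_nonneg (l : List Int) : ∀ g : Int, 0 ≤ g → 0 ≤ l.foldl mathGcd g := by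
  induction l with
  | nil => intro g hg; exact hg
  | cons x t ih =>
    intro g _
    rw [List.foldl_cons]
    exact ih (mathGcd g x) (by simp [mathGcd])

theorem foldl_mathGcd_dvd (l : List Int) :
    ∀ g : Int, (l.foldl mathGcd g) ∣ g ∧ ∀ x ∈ l, (l.foldl mathGcd g) ∣ x := by
  induction l with
  | nil => intro g; exact ⟨dvd_refl g, by simp⟩
  | cons x t ih =>
    intro g
    rw [List.foldl_cons]
    obtain ⟨h1, h2⟩ := ih (mathGcd g x)
    refine ⟨h1.trans ?_, ?_⟩
    · exact_mod_cast Int.gcd_dvd_left g x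
    · intro y hy
      rcases List.mem_cons.1 hy with rfl | hy
      · exact h1.trans (by exact_mod_cast Int.gcd_dvd_right g y)
      · exact h2 y hy

theorem dvd_foldl_mathGcd (l : List Int) (c : Int) :
    ∀ g : Int, c ∣ g → (∀ x ∈ l, c ∣ x) → c ∣ l.foldl mathGcd g := by
  induction l with
  | nil => intro g hg _; exact hg
  | cons x t ih =>
    intro g hg h
    rw [List.foldl_cons]
    refine ih (mathGcd g x) ?_ (fun y hy => h y (List.mem_cons_of_mem _ hy))
    show c ∣ (Int.gcd g x : Int)
    rw [Int.gcd]
    exact Int.natAbs_dvd.mp (Int.natCast_dvd_natCast.mpr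
      (Nat.dvd_gcd (Int.natAbs_dvd_natAbs.mpr hg) (Int.natAbs_dvd_natAbs.mpr (h x (List.mem_cons_self ..)))))

theorem seg_list_drop (nums : List Int) (a a' hi : Nat) (h : a ≤ a') :
    (nums.drop a').take (hi + 1 - a') = ((nums.drop a).take (hi + 1 - a)).drop (a' - a) := by
  rw [List.drop_take, List.drop_drop]
  congr 1
  · omega
  · congr 1; omega

theorem segGN_dvd (nums : List Int) (a a' hi : Nat) (h : a ≤ a') :
    segGN nums a hi ∣ segGN nums a' hi := by
  show segGN nums a hi ∣ ((nums.drop a').take (hi + 1 - a')).foldl mathGcd 0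
  rw [seg_list_drop nums a a' hi h]
  refine dvd_foldl_mathGcd _ _ 0 (dvd_zero _) ?_
  intro x hx
  exact (foldl_mathGcd_dvd _ 0).2 x (List.mem_of_mem_drop hx)

theorem segGN_nonneg (nums : List Int) (a hi : Nat) : 0 ≤ segGN nums a hi :=
  foldl_mathGcd_nonneg _ 0 le_rfl

theorem segGN_succ (nums : List Int) (a i : Nat) (ha : a ≤ i + 1) (hi : i + 1 < nums.length) :
    segGN nums a (i + 1) = mathGcd (segGN nums a i) nums[i + 1] := by
  unfold segGN
  have e1 : i + 1 + 1 - a = (i + 1 - a) + 1 := by omega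
  rw [e1, List.take_add_one]
  have e2 : (nums.drop a)[i + 1 - a]? = some nums[i + 1] := by
    rw [List.getElem?_drop]
    have e3 : a + (i + 1 - a) = i + 1 := by omega
    rw [e3, List.getElem?_eq_getElem hi]
  rw [e2]
  simp [List.foldl_append]

theorem segGN_self (nums : List Int) (i : Nat) (hi : i < nums.length) :
    segGN nums i i = mathGcd nums[i] nums[i] := by
  unfold segGN
  have e1 : i + 1 - i = 1 := by omega
  have e2 : (nums.drop i).take 1 = [nums[i]] := by
    rw [List.take_one, List.head?_drop, List.getElem?_eq_getElem hi]
    rfl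
  rw [e1, e2]
  simp [mathGcd, Int.gcd_self]

-- run-dedup commutes with mapping the values (any tail appended), since the map
-- sends equal values to equal values
theorem gsDedupGo_map (fv : Int → Int) (l : List (Int × Int)) :
    ∀ (t : List (Int × Int)) (a : Int),
      gsDedupGo (fv a) ((gsDedupGo a l).map (fun p => (fv p.1, p.2)) ++ t)
        = gsDedupGo (fv a) (l.map (fun p => (fv p.1, p.2)) ++ t) := by
  induction l with
  | nil => intro t a; rfl
  | cons p l ih =>
    intro t a
    by_cases hpa : p.1 = a
    · have h1 : gsDedupGo a (p :: l) = gsDedupGo a l := by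
        show (if p.1 ≠ a then p :: gsDedupGo p.1 l else gsDedupGo a l) = _
        rw [if_neg (by simp [hpa])]
      have h2 : fv p.1 = fv a := by rw [hpa]
      rw [h1, ih t a, List.map_cons, List.cons_append]
      show _ = (if fv p.1 ≠ fv a then _ else gsDedupGo (fv a) (l.map (fun p => (fv p.1, p.2)) ++ t))
      rw [if_neg (by simp [h2])]
    · have h1 : gsDedupGo a (p :: l) = p :: gsDedupGo p.1 l := by
        show (if p.1 ≠ a then p :: gsDedupGo p.1 l else gsDedupGo a l) = _
        rw [if_pos hpa]
      rw [h1, List.map_cons, List.map_cons, List.cons_append, List.cons_append]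
      by_cases hf : fv p.1 = fv a
      · show (if fv p.1 ≠ fv a then _ else gsDedupGo (fv a) ((gsDedupGo p.1 l).map (fun p => (fv p.1, p.2)) ++ t))
          = (if fv p.1 ≠ fv a then _ else gsDedupGo (fv a) (l.map (fun p => (fv p.1, p.2)) ++ t))
        rw [if_neg (by simp [hf]), if_neg (by simp [hf]), ← hf, ih t p.1]
      · show (if fv p.1 ≠ fv a then (fv p.1, p.2) :: gsDedupGo (fv p.1) ((gsDedupGo p.1 l).map (fun p => (fv p.1, p.2)) ++ t) else _)
          = (if fv p.1 ≠ fv a then (fv p.1, p.2) :: gsDedupGo (fv p.1) (l.map (fun p => (fv p.1, p.2)) ++ t) else _)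
        rw [if_pos hf, if_pos hf, ih t p.1]

theorem dedupFirst_map (fv : Int → Int) (l t : List (Int × Int)) :
    dedupFirst ((dedupFirst l).map (fun p => (fv p.1, p.2)) ++ t)
      = dedupFirst (l.map (fun p => (fv p.1, p.2)) ++ t) := by
  cases l with
  | nil => rfl
  | cons h l =>
    show dedupFirst ((fv h.1, h.2) :: ((gsDedupGo h.1 l).map (fun p => (fv p.1, p.2)) ++ t))
      = dedupFirst ((fv h.1, h.2) :: (l.map (fun p => (fv p.1, p.2)) ++ t))
    show (fv h.1, h.2) :: gsDedupGo (fv h.1) ((gsDedupGo h.1 l).map (fun p => (fv p.1, p.2)) ++ t)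
      = (fv h.1, h.2) :: gsDedupGo (fv h.1) (l.map (fun p => (fv p.1, p.2)) ++ t)
    rw [gsDedupGo_map fv l t h.1]

theorem mem_gsDedupGo (p : Int × Int) (l : List (Int × Int)) :
    ∀ a : Int, p ∈ gsDedupGo a l → p ∈ l := by
  induction l with
  | nil => intro a h; exact absurd h (by simp [gsDedupGo])
  | cons q l ih =>
    intro a h
    by_cases hq : q.1 = a
    · rw [show gsDedupGo a (q :: l) = gsDedupGo a l from by
        show (if q.1 ≠ a then _ else gsDedupGo a l) = _; rw [if_neg (by simp [hq])]] at h
      exact List.mem_cons_of_mem _ (ih a h)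
    · rw [show gsDedupGo a (q :: l) = q :: gsDedupGo q.1 l from by
        show (if q.1 ≠ a then _ else _) = _; rw [if_pos hq]] at h
      rcases List.mem_cons.1 h with rfl | h
      · exact List.mem_cons_self ..
      · exact List.mem_cons_of_mem _ (ih q.1 h)

theorem mem_dedupFirst (p : Int × Int) (l : List (Int × Int)) (h : p ∈ dedupFirst l) : p ∈ l := by
  cases l with
  | nil => exact absurd h (by simp [dedupFirst])
  | cons q l =>
    rcases List.mem_cons.1 h with rfl | h
    · exact List.mem_cons_self ..
    · exact List.mem_cons_of_mem _ (mem_gsDedupGo p l q.1 h)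

theorem mem_canon (nums : List Int) (i : Nat) (p : Int × Int) (hp : p ∈ canon nums i) :
    ∃ j : Nat, j ≤ i ∧ p = (segGN nums j i, (j : Int)) := by
  have hp' := mem_dedupFirst p _ hp
  obtain ⟨j, hj, hpe⟩ := List.mem_map.1 hp'
  exact ⟨j, by simpa using Nat.lt_succ_iff.1 (List.mem_range.1 hj), hpe.symm⟩

theorem coverGo (val : Nat → Int) :
    ∀ (cnt s : Nat) (a : Int) (t : Nat), s ≤ t → t < s + cnt →
      val t = a ∨ ∃ p ∈ gsDedupGo a ((List.range' s cnt).map (fun j => (val j, (j : Int)))),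
        p.2 ≤ (t : Int) ∧ p.1 = val t := by
  intro cnt
  induction cnt with
  | zero => intro s a t h1 h2; omega
  | succ c ih =>
    intro s a t h1 h2
    rw [List.range'_succ, List.map_cons]
    by_cases hsa : val s = a
    · rw [show gsDedupGo a ((val s, (s : Int)) :: (List.range' (s+1) c).map (fun j => (val j, (j : Int))))
          = gsDedupGo a ((List.range' (s+1) c).map (fun j => (val j, (j : Int)))) from by
        show (if (val s, (s : Int)).1 ≠ a then _ else _) = _; rw [if_neg (by simp [hsa])]]
      rcases Nat.eq_or_lt_of_le h1 with rfl | hst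
      · left; rw [hsa]
      · exact ih (s + 1) a t hst (by omega)
    · rw [show gsDedupGo a ((val s, (s : Int)) :: (List.range' (s+1) c).map (fun j => (val j, (j : Int))))
          = (val s, (s : Int)) :: gsDedupGo (val s) ((List.range' (s+1) c).map (fun j => (val j, (j : Int)))) from by
        show (if (val s, (s : Int)).1 ≠ a then _ else _) = _; rw [if_pos (by simpa using hsa)]]
      rcases Nat.eq_or_lt_of_le h1 with rfl | hst
      · right; exact ⟨(val s, (s : Int)), List.mem_cons_self .., le_refl _, rfl⟩
      · rcases ih (s + 1) (val s) t hst (by omega) with heq | ⟨p, hp, hle, hv⟩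
        · right; exact ⟨(val s, (s : Int)), List.mem_cons_self .., by exact_mod_cast Nat.cast_le.2 h1, heq.symm⟩
        · right; exact ⟨p, List.mem_cons_of_mem _ hp, hle, hv⟩

theorem canon_cover (nums : List Int) (i s : Nat) (hs : s ≤ i) :
    ∃ p ∈ canon nums i, p.2 ≤ (s : Int) ∧ p.1 = segGN nums s i := by
  unfold canon
  have hrange : List.range (i + 1) = 0 :: List.range' 1 i := by
    rw [List.range_eq_range', List.range'_succ]
  rw [hrange, List.map_cons]
  show ∃ p ∈ (segGN nums 0 i, ((0 : Nat) : Int)) ::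
      gsDedupGo (segGN nums 0 i, ((0 : Nat) : Int)).1 ((List.range' 1 i).map (fun j => (segGN nums j i, (j : Int)))), _
  rcases Nat.eq_zero_or_pos s with rfl | hs1
  · exact ⟨(segGN nums 0 i, ((0 : Nat) : Int)), List.mem_cons_self .., by simp, rfl⟩
  · rcases coverGo (fun j => segGN nums j i) i 1 (segGN nums 0 i) s hs1 (by omega) with heq | ⟨p, hp, hle, hv⟩
    · exact ⟨(segGN nums 0 i, ((0 : Nat) : Int)), List.mem_cons_self .., by simp, heq.symm⟩
    · exact ⟨p, List.mem_cons_of_mem _ hp, hle, hv⟩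

-- the iterated gs state and the list of all states
def gsIterFrom (prev : List (Int × Int)) (s : Int) (xs : List Int) : Nat → List (Int × Int)
  | 0 => prev
  | m + 1 => gsStep (gsIterFrom prev s xs m) (xs.getD m 0) (s + (m : Int))

def chain (prev : List (Int × Int)) (s : Int) : List Int → List (List (Int × Int))
  | [] => []
  | x :: xs => gsStep prev x s :: chain (gsStep prev x s) (s + 1) xs

def lastChain (prev : List (Int × Int)) (s : Int) : List Int → List (Int × Int)
  | [] => prev
  | x :: xs => lastChain (gsStep prev x s) (s + 1) xs

theorem enum_foldl (xs : List Int) :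
    ∀ (s : Int) (acc : List (List (Int × Int))) (prev : List (Int × Int)),
      (PySem.List.enumerate xs s).foldl
        (fun (st : List (List (Int × Int)) × List (Int × Int)) pr =>
          let g := gsStep st.2 pr.2 pr.1
          (st.1 ++ [g], g)) (acc, prev)
        = (acc ++ chain prev s xs, lastChain prev s xs) := by
  induction xs with
  | nil => intro s acc prev; simp [PySem.List.enumerate_nil, chain, lastChain]
  | cons x xs ih =>
    intro s acc prev
    rw [PySem.List.enumerate_cons, List.foldl_cons]
    show (PySem.List.enumerate xs (s + 1)).foldl _ (acc ++ [gsStep prev x s], gsStep prev x s) = _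
    rw [ih (s + 1) (acc ++ [gsStep prev x s]) (gsStep prev x s)]
    simp [chain, lastChain, List.append_assoc]

theorem buildGs_eq_chain (nums : List Int) : buildGs nums = chain [] 0 nums := by
  unfold buildGs
  rw [enum_foldl nums 0 [] []]
  simp

theorem gsIterFrom_shift (x : Int) (xs : List Int) (prev : List (Int × Int)) (s : Int) :
    ∀ m, gsIterFrom prev s (x :: xs) (m + 1) = gsIterFrom (gsStep prev x s) (s + 1) xs m := by
  intro m
  induction m with
  | zero => simp [gsIterFrom]
  | succ m ih =>
    show gsStep (gsIterFrom prev s (x :: xs) (m + 1)) ((x :: xs).getD (m + 1) 0) (s + ((m + 1 : Nat) : Int))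
      = gsStep (gsIterFrom (gsStep prev x s) (s + 1) xs m) (xs.getD m 0) ((s + 1) + (m : Int))
    rw [ih]
    congr 1
    · push_cast; ring

theorem chain_getElem? (xs : List Int) :
    ∀ (prev : List (Int × Int)) (s : Int) (t : Nat), t < xs.length →
      (chain prev s xs)[t]? = some (gsIterFrom prev s xs (t + 1)) := by
  induction xs with
  | nil => intro prev s t ht; simp at ht
  | cons x xs ih =>
    intro prev s t ht
    cases t with
    | zero => simp [chain, gsIterFrom]
    | succ t =>
      show (gsStep prev x s :: chain (gsStep prev x s) (s + 1) xs)[t + 1]? = _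
      rw [List.getElem?_cons_succ, ih (gsStep prev x s) (s + 1) t (by simpa using ht),
        ← gsIterFrom_shift]

theorem gsIter_eq_canon (nums : List Int) :
    ∀ i : Nat, i < nums.length → gsIterFrom [] 0 nums (i + 1) = canon nums i := by
  intro i
  induction i with
  | zero =>
    intro h0
    show gsStep (gsIterFrom [] 0 nums 0) (nums.getD 0 0) (0 + ((0 : Nat) : Int)) = canon nums 0
    rw [List.getD_eq_getElem nums 0 h0]
    show gsStep [] nums[0] (0 + ((0 : Nat) : Int)) = canon nums 0
    unfold gsStep canon
    simp [segGN_self nums 0 h0, List.range_succ]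
  | succ i ih =>
    intro hi
    have hi' : i < nums.length := by omega
    show gsStep (gsIterFrom [] 0 nums (i + 1)) (nums.getD (i + 1) 0) (0 + ((i + 1 : Nat) : Int))
      = canon nums (i + 1)
    rw [ih hi', List.getD_eq_getElem nums 0 hi]
    have hidx : (0 : Int) + ((i + 1 : Nat) : Int) = ((i + 1 : Nat) : Int) := by ring
    rw [hidx]
    unfold gsStep canon
    have hlist : (List.range (i + 1 + 1)).map (fun j => (segGN nums j (i + 1), (j : Int)))
        = ((List.range (i + 1)).map (fun j => (segGN nums j i, (j : Int)))).map
            (fun p => (mathGcd p.1 nums[i + 1], p.2))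
          ++ [(mathGcd nums[i + 1] nums[i + 1], ((i + 1 : Nat) : Int))] := by
      rw [List.range_succ, List.map_append, List.map_map]
      congr 1
      · refine List.map_congr_left ?_
        intro j hj
        have hj' : j ≤ i + 1 := by
          have := List.mem_range.1 hj; omega
        simp [Function.comp, segGN_succ nums j i hj' hi]
      · simp [segGN_self nums (i + 1) hi]
    rw [hlist, List.map_append]
    exact dedupFirst_map (fun v => mathGcd v nums[i + 1])
      ((List.range (i + 1)).map (fun j => (segGN nums j i, (j : Int))))
      [(mathGcd nums[i + 1] nums[i + 1], ((i + 1 : Nat) : Int))]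

theorem buildGs_getElem? (nums : List Int) (t : Nat) (ht : t < nums.length) :
    (buildGs nums)[t]? = some (canon nums t) := by
  rw [buildGs_eq_chain, chain_getElem? nums [] 0 t ht, gsIter_eq_canon nums t ht]

theorem findHit_none_iff (k i : Int) (l : List (Int × Int)) :
    findHit k i l = none ↔ ∀ p ∈ l, ¬(p.1 ≠ 1 ∧ i - p.2 + 1 > k) := by
  induction l with
  | nil => simp [findHit]
  | cons p l ih =>
    show (if p.1 ≠ 1 ∧ i - p.2 + 1 > k then some p.2 else findHit k i l) = none ↔ _
    by_cases h : p.1 ≠ 1 ∧ i - p.2 + 1 > k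
    · rw [if_pos h]
      simp only [List.forall_mem_cons]
      constructor
      · intro hfalse; exact absurd hfalse (by simp)
      · intro ⟨h1, _⟩; exact absurd h h1
    · rw [if_neg h, ih]
      constructor
      · intro hall q hq
        rcases List.mem_cons.1 hq with rfl | hq
        · exact h
        · exact hall q hq
      · intro hall q hq
        exact hall q (List.mem_cons_of_mem _ hq)

theorem findHit_some (k i : Int) (l : List (Int × Int)) (j : Int) :
    findHit k i l = some j → ∃ p ∈ l, p.2 = j ∧ p.1 ≠ 1 ∧ i - p.2 + 1 > k := by
  induction l with
  | nil => intro h; exact absurd h (by simp [findHit])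
  | cons p l ih =>
    show (if p.1 ≠ 1 ∧ i - p.2 + 1 > k then some p.2 else findHit k i l) = some j → _
    by_cases h : p.1 ≠ 1 ∧ i - p.2 + 1 > k
    · rw [if_pos h]
      intro he
      exact ⟨p, List.mem_cons_self .., Option.some.inj he, h⟩
    · rw [if_neg h]
      intro he
      obtain ⟨q, hq, rest⟩ := ih he
      exact ⟨q, List.mem_cons_of_mem _ hq, rest⟩

theorem hit_iff_window (nums : List Int) (i : Nat) (k : Int) (hk : 1 ≤ k) :
    (∃ p ∈ canon nums i, p.1 ≠ 1 ∧ (i : Int) - p.2 + 1 > k)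
      ↔ (k ≤ (i : Int) ∧ segGN nums ((i : Int) - k).toNat i ≠ 1) := by
  constructor
  · rintro ⟨p, hp, hne, hgt⟩
    obtain ⟨j, hj, rfl⟩ := mem_canon nums i p hp
    have hj0 : (0 : Int) ≤ (j : Int) := by positivity
    have hki : k ≤ (i : Int) := by omega
    refine ⟨hki, ?_⟩
    have hjs : j ≤ ((i : Int) - k).toNat := by omega
    intro h1
    have hd : segGN nums j i ∣ segGN nums ((i : Int) - k).toNat i :=
      segGN_dvd nums j ((i : Int) - k).toNat i hjs
    rw [h1] at hd
    exact hne (Int.eq_one_of_dvd_one (segGN_nonneg nums j i) hd)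
  · rintro ⟨hki, hw⟩
    have hs : ((i : Int) - k).toNat ≤ i := by omega
    obtain ⟨p, hp, hle, hv⟩ := canon_cover nums i (((i : Int) - k).toNat) hs
    refine ⟨p, hp, by rw [hv]; exact hw, ?_⟩
    have : ((((i : Int) - k).toNat : Nat) : Int) = (i : Int) - k := by omega
    omega

theorem loops_eq (nums : List Int) (k maxC : Int) (hk : 1 ≤ k) :
    ∀ (fuel : Nat) (i change : Int), i < (nums.length : Int) →
      checkLoopA (buildGs nums) k maxC fuel i change = checkLoopB nums k maxC fuel i change := by
  intro fuel
  induction fuel with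
  | zero => intro i change _; rfl
  | succ fuel ih =>
    intro i change hilen
    simp only [checkLoopA, checkLoopB]
    by_cases hi0 : i ≥ 0
    · obtain ⟨m, rfl⟩ : ∃ m : Nat, i = (m : Int) := ⟨i.toNat, (Int.toNat_of_nonneg hi0).symm⟩
      have hmN : m < nums.length := by exact_mod_cast hilen
      have hgs : PySem.List.pyGet? (buildGs nums) (m : Int) = some (canon nums m) := by
        rw [PySem.List.pyGet?_natCast, buildGs_getElem? nums m hmN]
      have hseg : k ≤ (m : Int) →
          winGcd nums 0 (PySem.List.pyRange ((m : Int) - k) ((m : Int) + 1) 1)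
            = segGN nums (((m : Int) - k).toNat) m := by
        intro hki
        rw [winGcd_eq_foldl, PySem.List.pyRange_one, List.foldl_map]
        unfold segGN
        have hb : (((m : Int) + 1) - ((m : Int) - k)).toNat = (k + 1).toNat := by omega
        rw [hb]
        have hcongr : List.foldl
            (fun (x : Int) (y : Nat) => mathGcd x (PySem.List.pyGetD nums ((m : Int) - k + (y : Int)) 0))
            0 (List.range ((k + 1).toNat))
          = List.foldl (fun (x : Int) (y : Nat) => mathGcd x (nums.getD (((m : Int) - k).toNat + y) 0))
            0 (List.range ((k + 1).toNat)) := by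
          refine PySem.List.foldl_congr_mem _ _ _ _ ?_
          intro acc t _
          congr 1
          have e3 : (m : Int) - k + (t : Int) = (((((m : Int) - k).toNat) + t : Nat) : Int) := by
            omega
          rw [e3, PySem.List.pyGetD_natCast]
        rw [hcongr, foldl_idx nums (((m : Int) - k).toNat) ((k + 1).toNat) (by omega) 0]
        have e4 : (k + 1).toNat = m + 1 - ((m : Int) - k).toNat := by omega
        rw [e4]
      rw [if_pos hi0]
      rw [if_pos hi0]
      rw [hgs]
      simp only [Option.getD_some]
      by_cases hc : k ≤ (m : Int) ∧ segGN nums (((m : Int) - k).toNat) m ≠ 1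
      · have hit : ∃ p ∈ canon nums m, p.1 ≠ 1 ∧ (m : Int) - p.2 + 1 > k :=
          (hit_iff_window nums m k hk).2 hc
        cases hfh : findHit k (m : Int) ((canon nums m).reverse) with
        | none =>
          exfalso
          rw [findHit_none_iff] at hfh
          obtain ⟨p, hp, h1, h2⟩ := hit
          exact hfh p (List.mem_reverse.2 hp) ⟨h1, h2⟩
        | some j =>
          obtain ⟨p, hp, rfl, hne, hgt⟩ := findHit_some k (m : Int) _ j hfh
          show (if change + 1 > maxC then false
              else checkLoopA (buildGs nums) k maxC fuel (max ((m : Int) - k - 1) (p.2 - 1)) (change + 1))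
            = _
          have hmax : max ((m : Int) - k - 1) (p.2 - 1) = (m : Int) - (k + 1) := by omega
          rw [hmax]
          have hcB : ((m : Int) ≥ k ∧
              winGcd nums 0 (PySem.List.pyRange ((m : Int) - k) ((m : Int) + 1) 1) ≠ 1) := by
            refine ⟨hc.1, ?_⟩
            rw [hseg hc.1]
            exact hc.2
          rw [if_pos hcB]
          by_cases hmc : change + 1 > maxC
          · rw [if_pos hmc, if_pos hmc]
          · rw [if_neg hmc, if_neg hmc]
            exact ih ((m : Int) - (k + 1)) (change + 1) (by omega)
      · have hnone : findHit k (m : Int) ((canon nums m).reverse) = none := by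
          rw [findHit_none_iff]
          intro p hp hcond
          exact hc ((hit_iff_window nums m k hk).1 ⟨p, List.mem_reverse.1 hp, hcond⟩)
        rw [hnone]
        show checkLoopA (buildGs nums) k maxC fuel ((m : Int) - 1) change = _
        have hcB : ¬((m : Int) ≥ k ∧
            winGcd nums 0 (PySem.List.pyRange ((m : Int) - k) ((m : Int) + 1) 1) ≠ 1) := by
          rintro ⟨h1, h2⟩
          rw [hseg h1] at h2
          exact hc ⟨h1, h2⟩
        rw [if_neg hcB]
        exact ih ((m : Int) - 1) change (by omega)
    · rw [if_neg hi0, if_neg hi0]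

theorem checks_eq (nums : List Int) (maxC k : Int) (hk0 : 0 ≤ k) :
    checkA nums (buildGs nums) maxC k = checkB nums maxC k := by
  unfold checkA checkB
  by_cases hk : k = 0
  · rw [if_pos hk, if_pos hk]
  · rw [if_neg hk, if_neg hk]
    refine loops_eq nums k maxC (by omega) (nums.length + 1) (PySem.List.len nums - 1) 0 ?_
    rw [PySem.List.len_eq]
    omega

theorem bsearch_eq (cA cB : Int → Bool) (n : Int)
    (h : ∀ m : Int, 0 ≤ m → m < n → cA m = cB m) :
    ∀ (fuel : Nat) (l r : Int), 0 ≤ l → r ≤ n →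
      bsearchA cA fuel l r = bsearchB cB fuel l r := by
  intro fuel
  induction fuel with
  | zero => intro l r _ _; rfl
  | succ fuel ih =>
    intro l r hl hr
    show (if l < r then _ else l) = (if l < r then _ else l)
    by_cases hlr : l < r
    · rw [if_pos hlr, if_pos hlr]
      show (if cA (PySem.Int.floordiv (l + r) 2) = true
          then bsearchA cA fuel l (PySem.Int.floordiv (l + r) 2)
          else bsearchA cA fuel (PySem.Int.floordiv (l + r) 2 + 1) r)
        = (if cB (PySem.Int.floordiv (l + r) 2) = true
          then bsearchB cB fuel l (PySem.Int.floordiv (l + r) 2)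
          else bsearchB cB fuel (PySem.Int.floordiv (l + r) 2 + 1) r)
      have hmid := PySem.Int.floordiv_two_mid_bounds (le_of_lt hlr)
      have hmidlt : PySem.Int.floordiv (l + r) 2 < r :=
        (PySem.Int.floordiv_lt_iff_lt_mul (by omega)).2 (by omega)
      have hm0 : 0 ≤ PySem.Int.floordiv (l + r) 2 := le_trans hl hmid.1
      rw [h _ hm0 (by omega)]
      by_cases hcb : cB (PySem.Int.floordiv (l + r) 2) = true
      · rw [if_pos hcb, if_pos hcb]
        exact ih l _ hl (by omega)
      · rw [if_neg hcb, if_neg hcb]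
        exact ih _ r (by omega) hr
    · rw [if_neg hlr, if_neg hlr]

-- ===== VERDICT (by name: the statement is the Claim_ definition above) =====
theorem minStable_spec : Claim_equal_minStable := by
  intro nums maxC _
  show minStable nums maxC = minStable_alt nums maxC
  show bsearchA (checkA nums (buildGs nums) maxC) (nums.length + 1) 0 (PySem.List.len nums)
    = bsearchB (checkB nums maxC) (nums.length + 1) 0 (PySem.List.len nums)
  refine bsearch_eq _ _ (nums.length : Int) ?_ (nums.length + 1) 0 (PySem.List.len nums)
    le_rfl (by rw [PySem.List.len_eq])
  intro m hm0 _
  exact checks_eq nums maxC m hm0
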